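-- pv_equiv track=rewrite | github.com/maridelvalle15/MISO-dermoapp-grupo12 | servicios_salud/flaskr/views/logica.py | construccion_porcentajes_certitud
-- ===== SOURCE A (Python) =====
-- def construccion_porcentajes_certitud(array,percentage):
--     ranges = []
--     for index,elem in enumerate(array):
--         if index == 0:
--             primer_percentage_range = 1
--         else:
--             primer_percentage_range = percentage*index
--         ranges.append([primer_percentage_range,percentage*(index+1)])
--
--     return ranges
-- ===== SOURCE B (Python) =====
-- def construccion_porcentajes_certitud(array, percentage):
--     # Build the ranges back-to-front with a running upper bound that is
--     # decremented by `percentage` each step (no per-element multiplication),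
--     # then reverse; the first range's lower bound falls out as the final step.
--     n = len(array)
--     if n == 0:
--         return []
--     ranges = []
--     hi = percentage * n
--     for _ in range(n - 1):
--         lo = hi - percentage
--         ranges.append([lo, hi])
--         hi = lo
--     ranges.append([1, hi])
--     ranges.reverse()
--     return ranges
-- ===== Notes on version B (the rewrite author's own statement) =====
-- stated objective: alternative
-- what changed: B builds the ranges back-to-front with a running upper bound decremented by percentage each step (no per-index multiplication or index==0 branch inside the loop) and reverses at the end, instead of A's forward enumerate loop that computes percentage*index per element and branches on index==0.
import Mathlib
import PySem

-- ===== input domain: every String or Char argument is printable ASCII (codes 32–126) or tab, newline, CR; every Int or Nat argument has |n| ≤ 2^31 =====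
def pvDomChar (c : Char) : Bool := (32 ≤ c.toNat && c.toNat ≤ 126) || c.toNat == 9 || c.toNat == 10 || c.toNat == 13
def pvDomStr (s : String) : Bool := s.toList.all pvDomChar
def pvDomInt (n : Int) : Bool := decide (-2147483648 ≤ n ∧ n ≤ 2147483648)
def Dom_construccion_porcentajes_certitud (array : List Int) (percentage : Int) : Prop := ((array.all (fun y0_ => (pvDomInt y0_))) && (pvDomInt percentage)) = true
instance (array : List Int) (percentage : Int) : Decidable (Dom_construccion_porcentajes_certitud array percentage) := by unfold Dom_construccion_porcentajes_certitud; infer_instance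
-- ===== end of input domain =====

-- B builds the ranges back-to-front with a running upper bound (subtraction instead of
-- per-index multiplication) and reverses at the end; alternative decomposition, same cost.


-- ===== PORT A =====
def construccion_porcentajes_certitud (array : List Int) (percentage : Int) : List (List Int) :=
  (PySem.List.enumerate array 0).foldl
    (fun ranges ie =>
      let primer_percentage_range : Int := if ie.1 = 0 then 1 else percentage * ie.1
      ranges ++ [[primer_percentage_range, percentage * (ie.1 + 1)]]) []

-- ===== PORT B =====
def construccion_porcentajes_certitud_alt (array : List Int) (percentage : Int) : List (List Int) :=
  let n := array.length
  if n = 0 then []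
  else
    -- running upper bound hi, decremented by percentage; ranges grow by append
    let st : List (List Int) × Int :=
      (List.range (n - 1)).foldl
        (fun st _ =>
          let lo := st.2 - percentage
          (st.1 ++ [[lo, st.2]], lo))
        ([], percentage * (n : Int))
    ((st.1 ++ [[1, st.2]]).reverse)

-- ===== PRECONDITION & SPEC =====
def Spec_construccion_porcentajes_certitud (array : List Int) (percentage : Int) (out : List (List Int)) : Prop := out = construccion_porcentajes_certitud_alt array percentage
instance (array : List Int) (percentage : Int) (out : List (List Int)) : Decidable (Spec_construccion_porcentajes_certitud array percentage out) := by unfold Spec_construccion_porcentajes_certitud; infer_instance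

-- ===== CLAIM (what is proved, stated in full; the proofs are below) =====
def Claim_equal_construccion_porcentajes_certitud : Prop := ∀ (array : List Int) (percentage : Int), Dom_construccion_porcentajes_certitud array percentage → Spec_construccion_porcentajes_certitud array percentage (construccion_porcentajes_certitud array percentage)

-- ===== LEMMAS AND PROOFS =====

-- generic: a foldl that appends one element per item is a map
theorem foldl_append_singleton {α β : Type} (g : α → β) (l : List α) (acc : List β) :
    l.foldl (fun r e => r ++ [g e]) acc = acc ++ l.map g := by
  induction l generalizing acc with
  | nil => simp
  | cons x xs ih => simp [ih]

-- closed form both ports are reduced to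
def pvSpec (percentage : Int) (n : Nat) : List (List Int) :=
  (List.range n).map
    (fun i : Nat => [if i = 0 then (1 : Int) else percentage * (i : Int), percentage * ((i : Int) + 1)])

theorem pv_A_eq (array : List Int) (percentage : Int) :
    construccion_porcentajes_certitud array percentage = pvSpec percentage array.length := by
  unfold construccion_porcentajes_certitud pvSpec
  rw [foldl_append_singleton
        (fun ie : Int × Int =>
          [if ie.1 = 0 then (1 : Int) else percentage * ie.1, percentage * (ie.1 + 1)])]
  apply List.ext_getElem
  · simp [PySem.List.length_enumerate]
  · intro i h1 h2
    simp only [List.nil_append, List.getElem_map, PySem.List.getElem_enumerate,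
      List.getElem_range, zero_add, Nat.cast_eq_zero]

-- the B loop in closed form: ranges grow as a map of running differences, hi ends at hi - p*k
theorem pv_B_loop (p : Int) (k : Nat) (acc : List (List Int)) (hi : Int) :
    (List.range k).foldl
      (fun (st : List (List Int) × Int) (_ : Nat) =>
        let lo := st.2 - p
        (st.1 ++ [[lo, st.2]], lo))
      (acc, hi)
    = (acc ++ (List.range k).map (fun j : Nat => [hi - p * ((j : Int) + 1), hi - p * (j : Int)]),
       hi - p * (k : Int)) := by
  induction k generalizing acc hi with
  | zero => simp
  | succ m ih =>
    rw [List.range_succ, List.foldl_append, ih]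
    simp only [List.foldl_cons, List.foldl_nil, List.map_append, List.map_cons,
      List.map_nil, List.append_assoc]
    rw [show hi - p * ((m : Int) + 1) = hi - p * (m : Int) - p from by ring,
        show hi - p * ((m + 1 : Nat) : Int) = hi - p * (m : Int) - p from by push_cast; ring]

-- reversing the back-to-front build gives the forward spec
theorem pv_rev_eq (p : Int) (m : Nat) :
    ((List.range m).map
        (fun j : Nat => [p * ((m + 1 : Nat) : Int) - p * ((j : Int) + 1),
                         p * ((m + 1 : Nat) : Int) - p * (j : Int)]) ++
      [[1, p * ((m + 1 : Nat) : Int) - p * (m : Int)]]).reverse = pvSpec p (m + 1) := by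
  apply List.ext_getElem
  · simp [pvSpec]
  · intro i h1 h2
    rw [List.getElem_reverse]
    simp only [List.length_append, List.length_map, List.length_range, List.length_cons,
      List.length_nil, List.length_reverse] at h1 ⊢
    have him : i < m + 1 := by omega
    by_cases hi0 : i = 0
    · subst hi0
      have hidx : m + (0 + 1) - 1 - 0 = m := by omega
      simp only [hidx]
      rw [List.getElem_append_right (by simp)]
      simp only [List.length_map, List.length_range, Nat.sub_self, List.getElem_cons_zero, pvSpec,
        List.getElem_map, List.getElem_range,]
      simp only [List.cons.injEq, and_true]
      refine ⟨rfl, by push_cast; ring⟩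
    · have hle : i ≤ m := by omega
      have hidx : m + (0 + 1) - 1 - i = m - i := by omega
      simp only [hidx]
      rw [List.getElem_append_left (by simp; omega)]
      simp only [List.getElem_map, List.getElem_range, pvSpec, hi0, if_false]
      simp only [List.cons.injEq, and_true]
      refine ⟨by push_cast [Nat.cast_sub hle]; ring, by push_cast [Nat.cast_sub hle]; ring⟩

theorem pv_B_eq (array : List Int) (percentage : Int) :
    construccion_porcentajes_certitud_alt array percentage = pvSpec percentage array.length := by
  unfold construccion_porcentajes_certitud_alt
  dsimp only
  cases harr : array.length with
  | zero => simp [pvSpec]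
  | succ m =>
    rw [if_neg (Nat.succ_ne_zero m)]
    simp only [Nat.succ_sub_one]
    rw [pv_B_loop]
    dsimp only
    rw [List.nil_append]
    exact pv_rev_eq percentage m

-- ===== VERDICT (by name: the statement is the Claim_ definition above) =====
theorem construccion_porcentajes_certitud_spec : Claim_equal_construccion_porcentajes_certitud := by
  intro array percentage _
  unfold Spec_construccion_porcentajes_certitud
  rw [pv_A_eq, pv_B_eq]
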